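-- pv_equiv track=rewrite | github.com/over7-maker/Advanced-Multi-Agent-Intelligence-System | .github/scripts/ai_automated_implementer.py | _apply_style_improvements
-- ===== SOURCE A (Python) =====
-- def _apply_style_improvements(content: str) -> str:
--     """Apply style improvements"""
--     # This is a simplified implementation
--     # In reality, this would use proper code formatting tools
--
--     lines = content.split('\n')
--     new_lines = []
--
--     for line in lines:
--         # Basic style improvements
--         if 'import *' in line:
--             # Replace wildcard imports with specific imports
--             new_lines.append('# TODO: Replace wildcard import with specific imports')
--             new_lines.append(line)
--         else:
--             new_lines.append(line)
--
--     return '\n'.join(new_lines)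
-- ===== SOURCE B (Python) =====
-- def _apply_style_improvements(content: str) -> str:
--     """Apply style improvements"""
--     todo = '# TODO: Replace wildcard import with specific imports\n'
--     result = ''
--     rest = content
--     while '\n' in rest:
--         i = rest.index('\n')
--         line, rest = rest[:i], rest[i + 1:]
--         if 'import *' in line:
--             result += todo
--         result += line + '\n'
--     if 'import *' in rest:
--         result += todo
--     return result + rest
-- ===== Notes on version B (the rewrite author's own statement) =====
-- stated objective: alternative
-- what changed: B drops the split-into-line-list / list-accumulator / join pipeline: it consumes the string in place, locating each newline by substring search, slicing off one line at a time and appending the optional TODO prefix and the line directly to the output string.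
import Mathlib
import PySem

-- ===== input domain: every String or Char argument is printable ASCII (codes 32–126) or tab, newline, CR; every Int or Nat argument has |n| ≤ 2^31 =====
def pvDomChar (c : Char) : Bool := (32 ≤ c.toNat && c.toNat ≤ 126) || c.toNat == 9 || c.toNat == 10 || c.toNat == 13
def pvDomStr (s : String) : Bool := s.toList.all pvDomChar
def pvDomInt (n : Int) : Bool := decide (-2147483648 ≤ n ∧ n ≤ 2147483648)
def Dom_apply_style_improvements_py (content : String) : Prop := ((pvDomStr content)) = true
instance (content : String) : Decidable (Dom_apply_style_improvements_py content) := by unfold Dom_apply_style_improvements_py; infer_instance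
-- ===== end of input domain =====

-- B replaces A's split-into-line-list + list accumulator + join with a single consuming
-- scan that finds each newline and appends directly to the output string (objective: alternative).

-- ===== PORT A =====
def pvTodo : List Char := "# TODO: Replace wildcard import with specific imports".toList
def pvImp : List Char := "import *".toList

def apply_style_improvements_py (content : String) : String :=
  let lines := PySem.Chars.splitOn content.toList ['\n']
  let new_lines := lines.foldl (fun acc line =>
    if PySem.Chars.isIn pvImp line = true then (acc ++ [pvTodo]) ++ [line]
    else acc ++ [line]) []
  String.ofList (PySem.Chars.join ['\n'] new_lines)

-- ===== PORT B =====
def pvTodoNl : List Char := "# TODO: Replace wildcard import with specific imports\n".toList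

-- the while-loop of Source B: result is the output built so far, rest the unscanned suffix
def pvAltGo (result rest : List Char) : List Char :=
  if h : PySem.Chars.isIn ['\n'] rest = true then
    pvAltGo
      ((result ++
          (if PySem.Chars.isIn pvImp (rest.take (PySem.Chars.find rest ['\n']).toNat) = true
           then pvTodoNl else [])) ++
        (rest.take (PySem.Chars.find rest ['\n']).toNat ++ ['\n']))
      (rest.drop ((PySem.Chars.find rest ['\n']).toNat + 1))
  else (result ++ (if PySem.Chars.isIn pvImp rest = true then pvTodoNl else [])) ++ rest
termination_by rest.length
decreasing_by
  have hne : rest ≠ [] := by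
    intro hnil
    rw [hnil, PySem.Chars.isIn_iff_infix] at h
    simp at h
  have : 0 < rest.length := List.length_pos_iff.mpr hne
  simp [List.length_drop]; omega

def apply_style_improvements_py_alt (content : String) : String :=
  String.ofList (pvAltGo [] content.toList)

-- ===== PRECONDITION & SPEC =====
def Spec_apply_style_improvements_py (content : String) (out : String) : Prop := out = apply_style_improvements_py_alt content
instance (content : String) (out : String) : Decidable (Spec_apply_style_improvements_py content out) := by unfold Spec_apply_style_improvements_py; infer_instance

-- ===== CLAIM (what is proved, stated in full; the proofs are below) =====
def Claim_equal_apply_style_improvements_py : Prop := ∀ (content : String), Dom_apply_style_improvements_py content → Spec_apply_style_improvements_py content (apply_style_improvements_py content)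

-- ===== LEMMAS AND PROOFS =====

-- pvAux cur l = A's split('\n') of l, with cur the reversed already-read prefix of the current line
def pvAux (cur : List Char) : List Char → List (List Char)
  | [] => [cur.reverse]
  | c :: rest => if c = '\n' then cur.reverse :: pvAux [] rest else pvAux (c :: cur) rest

def pvItems (line : List Char) : List (List Char) :=
  if PySem.Chars.isIn pvImp line = true then [pvTodo, line] else [line]

def pvG (lines : List (List Char)) : List Char :=
  PySem.Chars.join ['\n'] (lines.flatMap pvItems)

lemma pv_todoNl_eq : pvTodoNl = pvTodo ++ ['\n'] := by decide

lemma pv_splitOn_go_eq : ∀ (fuel : Nat) (l cur : List Char) (accs : List (List Char)),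
    l.length < fuel →
    PySem.Chars.splitOn.go ['\n'] fuel l cur accs = accs.reverse ++ pvAux cur l := by
  intro fuel
  induction fuel with
  | zero => intro l cur accs h; omega
  | succ f ih =>
    intro l cur accs h
    cases l with
    | nil => simp [PySem.Chars.splitOn.go, pvAux]
    | cons c rest =>
      have hr : rest.length < f := by simp at h; omega
      by_cases hc : c = '\n'
      · subst hc
        rw [PySem.Chars.splitOn.go]
        simp only [List.isPrefixOf, BEq.rfl, Bool.true_and, if_pos]
        have hd : List.drop ['\n'].length ('\n' :: rest) = rest := rfl
        rw [hd, ih _ _ _ hr]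
        simp [pvAux]
      · rw [PySem.Chars.splitOn.go]
        have : List.isPrefixOf ['\n'] (c :: rest) = false := by
          simp [List.isPrefixOf]; exact fun hc' => absurd hc'.symm hc
        rw [this]
        simp only [Bool.false_eq_true, if_false]
        rw [ih _ _ _ hr]
        simp [pvAux, hc]

lemma pv_splitOn_eq_aux (l : List Char) :
    PySem.Chars.splitOn l ['\n'] = pvAux [] l := by
  unfold PySem.Chars.splitOn
  simpa using pv_splitOn_go_eq (l.length + 1) l [] [] (Nat.lt_succ_self _)

lemma pv_foldl_eq_flatMap (lines : List (List Char)) (acc : List (List Char)) :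
    lines.foldl (fun acc line =>
      if PySem.Chars.isIn pvImp line = true then (acc ++ [pvTodo]) ++ [line]
      else acc ++ [line]) acc = acc ++ lines.flatMap pvItems := by
  induction lines generalizing acc with
  | nil => simp
  | cons l ls ih =>
    rw [List.foldl_cons, List.flatMap_cons]
    by_cases hp : PySem.Chars.isIn pvImp l = true
    · rw [if_pos hp, ih]; simp [pvItems, hp]
    · rw [if_neg hp, ih]; simp [pvItems, hp]

lemma pv_aux_ne_nil (cur l : List Char) : pvAux cur l ≠ [] := by
  induction l generalizing cur with
  | nil => simp [pvAux]
  | cons c rest ih =>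
    by_cases hc : c = '\n' <;> simp [pvAux, hc, ih]

lemma pv_flat_ne_nil (ls : List (List Char)) (h : ls ≠ []) : ls.flatMap pvItems ≠ [] := by
  cases ls with
  | nil => exact absurd rfl h
  | cons a t =>
    rw [List.flatMap_cons]
    unfold pvItems
    by_cases hp : PySem.Chars.isIn pvImp a = true <;> simp [hp]

lemma pv_g_single (l : List Char) :
    pvG [l] = (if PySem.Chars.isIn pvImp l = true then pvTodoNl else []) ++ l := by
  unfold pvG pvItems
  by_cases hp : PySem.Chars.isIn pvImp l = true
  · simp [hp, PySem.Chars.join_cons_cons, PySem.Chars.join_singleton, pv_todoNl_eq]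
  · simp [hp, PySem.Chars.join_singleton]

lemma pv_g_cons (l : List Char) (ls : List (List Char)) (h : ls ≠ []) :
    pvG (l :: ls) = ((if PySem.Chars.isIn pvImp l = true then pvTodoNl else []) ++ (l ++ ['\n'])) ++ pvG ls := by
  obtain ⟨b, bs, hbs⟩ := List.exists_cons_of_ne_nil (pv_flat_ne_nil ls h)
  unfold pvG
  rw [List.flatMap_cons, hbs]
  by_cases hp : PySem.Chars.isIn pvImp l = true
  · rw [show pvItems l = [pvTodo, l] by simp [pvItems, hp], if_pos hp]
    rw [List.cons_append, List.cons_append, List.nil_append,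
        PySem.Chars.join_cons_cons, PySem.Chars.join_cons_cons, pv_todoNl_eq]
    simp [List.append_assoc]
  · rw [show pvItems l = [l] by simp [pvItems, hp], if_neg hp]
    rw [List.cons_append, List.nil_append, PySem.Chars.join_cons_cons]
    simp [List.append_assoc]

lemma pv_aux_no_nl (l : List Char) (h : '\n' ∉ l) : ∀ cur, pvAux cur l = [cur.reverse ++ l] := by
  induction l with
  | nil => intro cur; simp [pvAux]
  | cons c rest ih =>
    intro cur
    have hc : c ≠ '\n' := fun hc => h (hc ▸ List.mem_cons_self)
    have hrest : '\n' ∉ rest := fun hm => h (List.mem_cons_of_mem _ hm)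
    simp [pvAux, hc, ih hrest, List.append_assoc]

lemma pv_aux_split (pre suf : List Char) (h : '\n' ∉ pre) :
    ∀ cur, pvAux cur (pre ++ '\n' :: suf) = (cur.reverse ++ pre) :: pvAux [] suf := by
  induction pre with
  | nil => intro cur; simp [pvAux]
  | cons c rest ih =>
    intro cur
    have hc : c ≠ '\n' := fun hc => h (hc ▸ List.mem_cons_self)
    have hrest : '\n' ∉ rest := fun hm => h (List.mem_cons_of_mem _ hm)
    simp [pvAux, hc, ih hrest, List.append_assoc]

lemma pv_altGo_no_nl (rest : List Char) (h : ¬ PySem.Chars.isIn ['\n'] rest = true) (result : List Char) :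
    pvAltGo result rest = result ++ pvG (pvAux [] rest) := by
  have hnn : '\n' ∉ rest := by
    intro hm
    obtain ⟨s, t, hst⟩ := List.append_of_mem hm
    exact h ((PySem.Chars.isIn_iff_infix _ _).mpr ⟨s, t, by rw [hst]; simp⟩)
  rw [pvAltGo, dif_neg h, pv_aux_no_nl rest hnn [], pv_g_single]
  simp [List.append_assoc]

lemma pv_main : ∀ (n : Nat) (rest : List Char), rest.length ≤ n → ∀ (result : List Char),
    pvAltGo result rest = result ++ pvG (pvAux [] rest) := by
  intro n
  induction n with
  | zero =>
    intro rest hlen result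
    have : ¬ PySem.Chars.isIn ['\n'] rest = true := by
      have : rest = [] := List.eq_nil_of_length_eq_zero (Nat.le_zero.mp hlen)
      subst this
      intro h
      rw [PySem.Chars.isIn_iff_infix] at h
      simp at h
    exact pv_altGo_no_nl rest this result
  | succ m ih =>
    intro rest hlen result
    by_cases h : PySem.Chars.isIn ['\n'] rest = true
    · have hpos : 0 ≤ PySem.Chars.find rest ['\n'] :=
        (PySem.Chars.find_nonneg_iff _ _).mpr ((PySem.Chars.isIn_iff_infix _ _).mp h)
      obtain ⟨hpre, hmin⟩ := PySem.Chars.find_spec hpos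
      set i := (PySem.Chars.find rest ['\n']).toNat with hidef
      obtain ⟨t, ht⟩ := hpre
      have hdropi : rest.drop i = '\n' :: t := by simpa using ht.symm
      have hi : i < rest.length := by
        by_contra hge
        have : rest.drop i = [] := List.drop_eq_nil_of_le (Nat.le_of_not_lt hge)
        rw [this] at hdropi; simp at hdropi
      have htl : rest.drop (i + 1) = t := by
        have : rest.drop (i + 1) = (rest.drop i).drop 1 := by
          rw [List.drop_drop]
        rw [this, hdropi]; rfl
      have hsplit : rest = rest.take i ++ '\n' :: rest.drop (i + 1) := by
        rw [htl, ← hdropi]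
        exact (List.take_append_drop i rest).symm
      have hnpre : '\n' ∉ rest.take i := by
        intro hm
        obtain ⟨j, hj, hje⟩ := List.getElem_of_mem hm
        have hj' : j < i ∧ j < rest.length := by simpa using hj
        have hji : j < i := hj'.1
        have hjl : j < rest.length := hj'.2
        have : rest[j] = '\n' := by
          rw [← hje, List.getElem_take]
        exact hmin j hji ⟨rest.drop (j + 1), by rw [← this, List.cons_append, List.nil_append,
          ← List.drop_eq_getElem_cons hjl]⟩
      have hlen' : (rest.drop (i + 1)).length ≤ m := by
        simp [List.length_drop]; omega
      rw [pvAltGo, dif_pos h, ← hidef, ih _ hlen']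
      conv_rhs => rw [hsplit, pv_aux_split _ _ hnpre []]
      rw [pv_g_cons _ _ (pv_aux_ne_nil _ _)]
      simp [List.append_assoc]
    · exact pv_altGo_no_nl rest h result

-- ===== VERDICT (by name: the statement is the Claim_ definition above) =====
theorem apply_style_improvements_py_spec : Claim_equal_apply_style_improvements_py := by
  intro content _
  unfold Spec_apply_style_improvements_py
  simp only [apply_style_improvements_py, apply_style_improvements_py_alt]
  rw [pv_main (content.toList.length) content.toList le_rfl [],
      pv_splitOn_eq_aux, pv_foldl_eq_flatMap]
  simp [pvG]
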